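-- pv_equiv track=rewrite | github.com/vfvfvf-jc/-1 | 实验1/2.py | filter_possible_keys
-- ===== SOURCE A (Python) =====
-- import string
--
-- def filter_possible_keys(subarray):  # 该函数根据字符类型进一步筛选密钥
--     allowed_characters = string.ascii_letters + string.digits + ',. '  # 允许的字符：字母、数字、逗号、句号、空格
--     candidate_keys = list(range(0x00, 0xFF))  # 枚举所有可能的密钥值
--     valid_keys = candidate_keys.copy()  # 存储潜在有效的密钥
--
--     for key in candidate_keys:  # 对每个密钥进行测试
--         for char in subarray:
--             if chr(char ^ key) not in allowed_characters:  # 如果解密结果不在允许字符范围，排除该密钥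
--                 valid_keys.remove(key)
--                 break
--
--     return valid_keys
-- ===== SOURCE B (Python) =====
-- import string
--
-- def filter_possible_keys(subarray):
--     allowed_characters = string.ascii_letters + string.digits + ',. '
--     possible = set(range(0x00, 0xFF))
--     for char in subarray:
--         possible &= {char ^ ord(a) for a in allowed_characters}
--         if not possible:
--             break
--     return sorted(possible)
-- ===== Notes on version B (the rewrite author's own statement) =====
-- stated objective: alternative
-- what changed: Instead of testing each of the 255 candidate keys against every character (removing failed keys from a list), B makes one pass over the characters, intersecting a shrinking set of possible keys with {char ^ ord(a) for allowed a} and stopping once the set is empty, then returns the sorted survivors.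
import Mathlib
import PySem

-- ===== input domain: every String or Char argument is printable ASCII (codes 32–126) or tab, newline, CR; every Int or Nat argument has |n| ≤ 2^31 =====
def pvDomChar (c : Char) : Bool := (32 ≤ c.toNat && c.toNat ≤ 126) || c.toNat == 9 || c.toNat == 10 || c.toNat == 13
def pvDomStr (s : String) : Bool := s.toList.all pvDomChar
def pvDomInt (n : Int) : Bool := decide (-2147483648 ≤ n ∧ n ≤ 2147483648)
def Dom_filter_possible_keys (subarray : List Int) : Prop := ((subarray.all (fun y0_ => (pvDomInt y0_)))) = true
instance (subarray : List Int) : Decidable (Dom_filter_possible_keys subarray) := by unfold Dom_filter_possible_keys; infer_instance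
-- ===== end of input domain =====

-- B replaces the key-driven double loop (test all 255 keys, removing from a list) by one pass over
-- the characters that intersects a shrinking candidate-key set; objective: alternative algorithm.

-- ===== PORT A =====
-- allowed_characters = string.ascii_letters + string.digits + ',. ', ported as the list of its
-- code points; 'chr(char ^ key) not in allowed_characters' is ported as non-membership of the code
-- (exact wherever chr() does not raise, which Pre_ guarantees on every reached character).
def pvAllowed : List Int :=
  "abcdefghijklmnopqrstuvwxyzABCDEFGHIJKLMNOPQRSTUVWXYZ0123456789,. ".toList.map
    (fun ch => (ch.toNat : Int))

-- the inner 'for char in subarray: … remove; break' loop of A, for one key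
def pvScanChars (valid : List Int) (key : Int) : List Int → List Int
  | [] => valid
  | c :: rest =>
      if PySem.Int.bxor c key ∈ pvAllowed then pvScanChars valid key rest
      else (PySem.List.remove? valid key).getD valid  -- list.remove: always succeeds here (key still in valid)

def filter_possible_keys (subarray : List Int) : List Int :=
  let candidate_keys := PySem.List.pyRange 0 255 1
  let valid_keys := candidate_keys
  candidate_keys.foldl (fun valid key => pvScanChars valid key subarray) valid_keys

-- ===== PORT B =====
-- B's loop with its 'if not possible: break' early exit
def pvShrink (poss : PySem.Set Int) : List Int → PySem.Set Int
  | [] => poss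
  | c :: rest =>
      let poss' := PySem.Set.inter poss (PySem.Set.ofList (pvAllowed.map (fun a => PySem.Int.bxor c a)))
      if poss'.isEmpty then poss' else pvShrink poss' rest

def filter_possible_keys_alt (subarray : List Int) : List Int :=
  let possible : PySem.Set Int := PySem.Set.ofList (PySem.List.pyRange 0 255 1)
  let final := pvShrink possible subarray
  PySem.List.sorted final (fun x => x) false

-- ===== PRECONDITION & SPEC =====
-- A raises ValueError in chr(char ^ key) exactly when an element outside chr's range 0 … 0x10FFFF
-- is reached while some candidate key is still alive; Pre_ excludes exactly that: either every
-- element is a valid code point, or the prefix of valid code points already eliminates every key.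
def Pre_filter_possible_keys (subarray : List Int) : Prop :=
  (∀ c ∈ subarray, 0 ≤ c ∧ c ≤ 1114111) ∨
  (∀ k ∈ PySem.List.pyRange 0 255 1,
    ∃ c ∈ subarray.takeWhile (fun c => decide (0 ≤ c ∧ c ≤ 1114111)),
      PySem.Int.bxor c k ∉ pvAllowed)
instance (subarray : List Int) : Decidable (Pre_filter_possible_keys subarray) := by
  unfold Pre_filter_possible_keys; infer_instance

def pvWitness_filter_possible_keys : List Int := [65, 97]

def Spec_filter_possible_keys (subarray : List Int) (out : List Int) : Prop := out = filter_possible_keys_alt subarray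
instance (subarray : List Int) (out : List Int) : Decidable (Spec_filter_possible_keys subarray out) := by unfold Spec_filter_possible_keys; infer_instance

-- ===== CLAIM (what is proved, stated in full; the proofs are below) =====
def Claim_equal_filter_possible_keys : Prop := ∀ (subarray : List Int), Dom_filter_possible_keys subarray → Pre_filter_possible_keys subarray → Spec_filter_possible_keys subarray (filter_possible_keys subarray)

-- ===== LEMMAS AND PROOFS =====

-- the key predicate both programs compute: key k decrypts every char of subarray into pvAllowed
def pvPass (subarray : List Int) (k : Int) : Bool :=
  subarray.all (fun c => decide (PySem.Int.bxor c k ∈ pvAllowed))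

theorem pvBxor_invol (c a : Int) : PySem.Int.bxor c (PySem.Int.bxor c a) = a := by
  unfold PySem.Int.bxor
  rcases le_or_gt 0 c with hc | hc <;> rcases le_or_gt 0 a with ha | ha
  · simp only [if_pos hc, if_pos ha, if_pos (by positivity : (0:Int) ≤ ((c.toNat ^^^ a.toNat : Nat) : Int))]
    rw [Int.toNat_natCast, Nat.xor_xor_cancel_left, Int.toNat_of_nonneg ha]
  · have hb : ¬ (0 ≤ a) := by omega
    simp only [if_pos hc, if_neg hb]
    have hneg : ¬ (0 ≤ (-(((c.toNat ^^^ (-a-1).toNat : Nat) : Int)) - 1)) := by omega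
    simp only [if_neg hneg]
    have : (-(-(((c.toNat ^^^ (-a-1).toNat : Nat) : Int)) - 1) - 1) = ((c.toNat ^^^ (-a-1).toNat : Nat) : Int) := by ring
    rw [this, Int.toNat_natCast, Nat.xor_xor_cancel_left, Int.toNat_of_nonneg (by omega)]
    omega
  · have hc' : ¬ (0 ≤ c) := by omega
    simp only [if_neg hc', if_pos ha]
    have hneg : ¬ (0 ≤ (-((((-c-1).toNat ^^^ a.toNat : Nat) : Int)) - 1)) := by omega
    simp only [if_neg hneg]
    have : (-(-((((-c-1).toNat ^^^ a.toNat : Nat) : Int)) - 1) - 1) = (((-c-1).toNat ^^^ a.toNat : Nat) : Int) := by ring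
    rw [this, Int.toNat_natCast, Nat.xor_xor_cancel_left, Int.toNat_of_nonneg ha]
  · have hc' : ¬ (0 ≤ c) := by omega
    have ha' : ¬ (0 ≤ a) := by omega
    simp only [if_neg hc', if_neg ha', if_pos (by positivity : (0:Int) ≤ (((-c-1).toNat ^^^ (-a-1).toNat : Nat) : Int))]
    rw [Int.toNat_natCast, Nat.xor_xor_cancel_left, Int.toNat_of_nonneg (by omega)]
    omega

-- A's inner loop: keep valid if every char passes, otherwise remove key (first failure breaks)
theorem pvScanChars_eq (valid : List Int) (key : Int) (cs : List Int) :
    pvScanChars valid key cs =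
      if pvPass cs key then valid else (PySem.List.remove? valid key).getD valid := by
  induction cs with
  | nil => simp [pvScanChars, pvPass]
  | cons c rest ih =>
      by_cases h : PySem.Int.bxor c key ∈ pvAllowed
      · simp [pvScanChars, ih, pvPass, h]
      · simp [pvScanChars, pvPass, h]

-- A's outer loop over a nodup key list keeps exactly the passing keys, in order
theorem pvFoldl_scan (subarray : List Int) :
    ∀ (ks pre : List Int), (pre ++ ks).Nodup →
      ks.foldl (fun valid key => pvScanChars valid key subarray) (pre ++ ks) =
        pre ++ ks.filter (pvPass subarray) := by
  intro ks
  induction ks with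
  | nil => intro pre _; simp
  | cons k ks ih =>
      intro pre hnd
      have hknotpre : k ∉ pre := by
        intro hk
        exact (List.disjoint_of_nodup_append hnd) hk (List.mem_cons_self)
      rw [List.foldl_cons, pvScanChars_eq]
      by_cases hp : pvPass subarray k
      · rw [if_pos hp]
        have h1 : pre ++ k :: ks = (pre ++ [k]) ++ ks := by simp
        rw [h1, ih (pre ++ [k]) (by rw [← h1]; exact hnd)]
        simp [hp]
      · rw [if_neg hp]
        have hkmem : k ∈ pre ++ k :: ks := by simp
        rw [PySem.List.remove?_eq_some_erase _ _ hkmem]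
        simp only [Option.getD_some]
        rw [List.erase_append_right _ hknotpre, List.erase_cons_head]
        have hnd' : (pre ++ ks).Nodup :=
          hnd.sublist (List.Sublist.append_left (List.sublist_cons_self k ks) pre)
        rw [ih pre hnd']
        simp [hp]

theorem pvA_char (subarray : List Int) :
    filter_possible_keys subarray =
      (PySem.List.pyRange 0 255 1).filter (pvPass subarray) := by
  unfold filter_possible_keys
  have := pvFoldl_scan subarray (PySem.List.pyRange 0 255 1) []
  simpa using this (by simpa using PySem.List.nodup_pyRange_one 0 255)

-- the per-char candidate set {char ^ ord(a) | a allowed} contains k iff k decrypts char into pvAllowed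
theorem pvMem_map_bxor (c k : Int) :
    k ∈ pvAllowed.map (fun a => PySem.Int.bxor c a) ↔ PySem.Int.bxor c k ∈ pvAllowed := by
  constructor
  · rintro hk
    rcases List.mem_map.mp hk with ⟨a, ha, rfl⟩
    rwa [pvBxor_invol]
  · intro h
    exact List.mem_map.mpr ⟨PySem.Int.bxor c k, h, pvBxor_invol c k⟩

-- membership in B's shrinking set after the whole loop (the early exit only cuts dead branches)
theorem pvMem_final (subarray : List Int) :
    ∀ (poss : List Int) (k : Int),
      k ∈ pvShrink poss subarray
        ↔ k ∈ poss ∧ ∀ c ∈ subarray, PySem.Int.bxor c k ∈ pvAllowed := by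
  induction subarray with
  | nil => intro poss k; simp [pvShrink]
  | cons c rest ih =>
      intro poss k
      have hmem : ∀ x : Int,
          x ∈ PySem.Set.inter poss (PySem.Set.ofList (pvAllowed.map (fun a => PySem.Int.bxor c a)))
            ↔ x ∈ poss ∧ PySem.Int.bxor c x ∈ pvAllowed := by
        intro x
        rw [PySem.Set.mem_inter, PySem.Set.mem_ofList, pvMem_map_bxor]
      by_cases hemp :
          (PySem.Set.inter poss (PySem.Set.ofList (pvAllowed.map (fun a => PySem.Int.bxor c a)))).isEmpty
      · simp only [pvShrink, if_pos hemp]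
        rw [List.isEmpty_iff] at hemp
        constructor
        · intro hk; rw [hemp] at hk; simp at hk
        · rintro ⟨h1, h2⟩
          have : k ∈ PySem.Set.inter poss (PySem.Set.ofList (pvAllowed.map (fun a => PySem.Int.bxor c a))) :=
            (hmem k).mpr ⟨h1, h2 c (List.mem_cons_self)⟩
          rw [hemp] at this; simp at this
      · simp only [pvShrink, if_neg hemp]
        rw [ih, hmem]
        simp only [List.mem_cons]
        constructor
        · rintro ⟨⟨h1, h2⟩, h3⟩
          exact ⟨h1, fun x hx => hx.elim (fun he => he ▸ h2) (h3 x)⟩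
        · rintro ⟨h1, h2⟩
          exact ⟨⟨h1, h2 c (Or.inl rfl)⟩, fun x hx => h2 x (Or.inr hx)⟩

theorem pvNodup_final (subarray : List Int) :
    ∀ (poss : List Int), poss.Nodup → (pvShrink poss subarray).Nodup := by
  induction subarray with
  | nil => intro poss h; simpa [pvShrink] using h
  | cons c rest ih =>
      intro poss h
      by_cases hemp :
          (PySem.Set.inter poss (PySem.Set.ofList (pvAllowed.map (fun a => PySem.Int.bxor c a)))).isEmpty
      · rw [List.isEmpty_iff] at hemp
        simp [pvShrink, hemp]
      · simp only [pvShrink, if_neg hemp]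
        exact ih _ (PySem.Set.nodup_inter _ _ h)

-- ===== VERDICT (by name: the statement is the Claim_ definition above) =====
theorem filter_possible_keys_spec : Claim_equal_filter_possible_keys := by
  intro subarray _ _
  unfold Spec_filter_possible_keys
  unfold filter_possible_keys_alt
  rw [pvA_char]

  have hnr : (PySem.List.pyRange 0 255 1).Nodup := PySem.List.nodup_pyRange_one 0 255
  have hofl : PySem.Set.ofList (PySem.List.pyRange 0 255 1) = PySem.List.pyRange 0 255 1 :=
    PySem.Set.ofList_eq_self_of_nodup _ hnr
  refine (PySem.List.sorted_eq_of_perm_of_pairwise_lt _ _ _ ?_ ?_).symm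
  · rw [List.perm_ext_iff_of_nodup (hnr.filter _) (pvNodup_final subarray _ (by rw [hofl]; exact hnr))]
    intro k
    rw [pvMem_final, List.mem_filter, hofl]
    unfold pvPass
    simp [List.all_eq_true]
  · exact (PySem.List.pairwise_lt_pyRange_one 0 255).filter _
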